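-- pv_equiv track=rewrite | github.com/Uber-Career-Prep-2023/Uber-Career-Prep-Tanish-PradhanWongAhSui- | Assignment 3/FirstKBinaryNumbers.py | firstkbnums
-- ===== SOURCE A (Python) =====
-- from collections import deque
--
-- def firstkbnums(k: int)-> list[str]:
--
--     # time - O(k), space - O(k)
--     if k < 1:
--         return []
--     result = ["0"]
--     queue = deque(['1'])
--
--     while len(result) < k:
--         binary = queue.popleft()
--         result.append(binary)
--
--         # using the pattern that consecutive binary numbers follow
--         queue.append(binary + '0')
--         queue.append(binary + '1')
--
--     return result
-- ===== SOURCE B (Python) =====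
-- def firstkbnums(k: int) -> list[str]:
--     # Direct closed form: the i-th binary number is just i in base 2.
--     return [format(i, 'b') for i in range(k)]
-- ===== Notes on version B (the rewrite author's own statement) =====
-- stated objective: simpler
-- what changed: Replaced the deque/BFS that derives each binary string from a parent by appending '0'/'1' with a direct per-index conversion: the i-th output is format(i,'b'), so no queue or shared state is kept.
import Mathlib
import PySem

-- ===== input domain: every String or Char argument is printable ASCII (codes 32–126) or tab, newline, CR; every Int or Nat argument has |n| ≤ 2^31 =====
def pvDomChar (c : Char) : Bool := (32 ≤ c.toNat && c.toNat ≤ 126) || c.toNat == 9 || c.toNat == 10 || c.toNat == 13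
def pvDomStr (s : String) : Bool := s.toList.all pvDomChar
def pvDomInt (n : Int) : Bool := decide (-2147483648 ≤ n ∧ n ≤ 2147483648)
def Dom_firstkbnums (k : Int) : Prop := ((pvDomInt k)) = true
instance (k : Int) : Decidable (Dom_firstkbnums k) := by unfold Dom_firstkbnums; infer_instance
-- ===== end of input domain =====

-- B drops A's deque/BFS (each string derived from a parent by appending '0'/'1') and instead
-- converts each index 0..k-1 to binary directly with format(i,'b'): simpler, no shared queue state.


-- ===== PORT A =====
-- the while-loop: pop from the queue, append to result, push child strings.
-- The `[] => result` branch is a totality guard only: in A the queue is never empty when popped.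
def firstkbnumsLoop (k : Int) (result queue : List String) : List String :=
  if h : (result.length : Int) < k then
    match queue with
    | [] => result
    | b :: rest => firstkbnumsLoop k (result ++ [b]) (rest ++ [b ++ "0", b ++ "1"])
  else result
termination_by (k - result.length).toNat
decreasing_by simp only [List.length_append, List.length_cons, List.length_nil]; omega

def firstkbnums (k : Int) : List String :=
  if k < 1 then []
  else firstkbnumsLoop k ["0"] ["1"]

-- ===== PORT B =====
-- [format(i,'b') for i in range(k)]
def firstkbnums_alt (k : Int) : List String :=
  (PySem.List.pyRange 0 k 1).map (fun i => PySem.Int.toBin i)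

-- ===== PRECONDITION & SPEC =====
def Spec_firstkbnums (k : Int) (out : List String) : Prop := out = firstkbnums_alt k
instance (k : Int) (out : List String) : Decidable (Spec_firstkbnums k out) := by unfold Spec_firstkbnums; infer_instance

-- ===== CLAIM (what is proved, stated in full; the proofs are below) =====
def Claim_equal_firstkbnums : Prop := ∀ (k : Int), Dom_firstkbnums k → Spec_firstkbnums k (firstkbnums k)

-- ===== LEMMAS AND PROOFS =====

-- binary digits of n, most significant first (recursion mirror of Nat.toDigits 2)
def bdigits (n : Nat) : List Char :=
  if n / 2 = 0 then [(n % 2).digitChar]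
  else bdigits (n / 2) ++ [(n % 2).digitChar]
decreasing_by exact Nat.div_lt_self (by omega) (by omega)

lemma toDigitsCore_eq_bdigits : ∀ (f n : Nat) (acc : List Char), n < f →
    Nat.toDigitsCore 2 f n acc = bdigits n ++ acc := by
  intro f
  induction f with
  | zero => omega
  | succ f ih =>
    intro n acc h
    rw [Nat.toDigitsCore, bdigits]
    by_cases h2 : n / 2 = 0
    · simp [h2]
    · simp only [h2, if_false]
      rw [ih (n / 2) _ (by omega)]
      simp

lemma toDigits_eq_bdigits (n : Nat) : Nat.toDigits 2 n = bdigits n :=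
  by rw [Nat.toDigits, toDigitsCore_eq_bdigits n.succ n [] (Nat.lt_succ_self n)]; simp

lemma toBinChars_eq_bdigits (n : Nat) : PySem.Int.toBinChars (n : Int) = bdigits n := by
  simp [PySem.Int.toBinChars, toDigits_eq_bdigits]

def bin (n : Nat) : String := PySem.Int.toBin (n : Int)

lemma bdigits_double (n : Nat) (h : 1 ≤ n) : bdigits (2 * n) = bdigits n ++ ['0'] := by
  rw [bdigits]
  have h1 : 2 * n / 2 = n := by omega
  have h2 : 2 * n % 2 = 0 := by omega
  rw [h1, h2, if_neg (by omega : ¬ n = 0)]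
  rfl

lemma bdigits_double_add_one (n : Nat) (h : 1 ≤ n) :
    bdigits (2 * n + 1) = bdigits n ++ ['1'] := by
  rw [bdigits]
  have h1 : (2 * n + 1) / 2 = n := by omega
  have h2 : (2 * n + 1) % 2 = 1 := by omega
  rw [h1, h2, if_neg (by omega : ¬ n = 0)]
  rfl

lemma toList_bin (n : Nat) : (bin n).toList = bdigits n := by
  rw [bin, PySem.Int.toList_toBin, toBinChars_eq_bdigits]

lemma bin_append0 (n : Nat) (h : 1 ≤ n) : bin (2 * n) = bin n ++ "0" := by
  apply String.toList_inj.mp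
  rw [String.toList_append, toList_bin, toList_bin, bdigits_double n h]
  rfl

lemma bin_append1 (n : Nat) (h : 1 ≤ n) : bin (2 * n + 1) = bin n ++ "1" := by
  apply String.toList_inj.mp
  rw [String.toList_append, toList_bin, toList_bin, bdigits_double_add_one n h]
  rfl

lemma loop_inv : ∀ (d : Nat) (k : Int) (n : Nat), 1 ≤ n → k.toNat - n = d →
    firstkbnumsLoop k ((List.range n).map bin) ((List.range' n n).map bin)
      = (List.range (max n k.toNat)).map bin := by
  intro d
  induction d with
  | zero =>
    intro k n hn hd
    rw [firstkbnumsLoop.eq_def]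
    have : ¬ (((List.range n).map bin).length : Int) < k := by simp only [List.length_map, List.length_range]; omega
    rw [dif_neg this]
    have : max n k.toNat = n := by omega
    rw [this]
  | succ d ih =>
    intro k n hn hd
    rw [firstkbnumsLoop.eq_def]
    have hlt : (((List.range n).map bin).length : Int) < k := by simp only [List.length_map, List.length_range]; omega
    rw [dif_pos hlt]
    have hq : List.range' n n = n :: List.range' (n + 1) (n - 1) := by
      have : n = (n - 1) + 1 := by omega
      conv_lhs => rw [this, List.range'_succ]
      rw [← this]
    rw [hq]
    simp only [List.map_cons]
    have hres : (List.range n).map bin ++ [bin n] = (List.range (n + 1)).map bin := by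
      rw [List.range_succ, List.map_append, List.map_singleton]
    have hr : List.range' (n + 1) (n + 1) = List.range' (n + 1) (n - 1) ++ [2 * n, 2 * n + 1] := by
      have e : n + 1 = (n - 1) + 1 + 1 := by omega
      rw [e, List.range'_concat, List.range'_concat]
      have e1 : n - 1 + 1 + 1 + 1 * (n - 1) = 2 * n := by omega
      have e2 : n - 1 + 1 + 1 + 1 * (n - 1 + 1) = 2 * n + 1 := by omega
      rw [e1, e2, List.append_assoc]
      rfl
    have hqueue : (List.range' (n + 1) (n - 1)).map bin ++ [bin n ++ "0", bin n ++ "1"]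
        = (List.range' (n + 1) (n + 1)).map bin := by
      rw [← bin_append0 n hn, ← bin_append1 n hn, hr, List.map_append]
      rfl
    have ha : (1 : Nat) ≤ n + 1 := by omega
    have hb : k.toNat - (n + 1) = d := by omega
    rw [hres, hqueue, ih k (n + 1) ha hb]
    have hnk : n < k.toNat := by omega
    have hm : max (n + 1) k.toNat = max n k.toNat := by omega
    rw [hm]

theorem firstkbnums_spec : Claim_equal_firstkbnums := by
  intro k _
  unfold Spec_firstkbnums firstkbnums firstkbnums_alt
  rw [PySem.List.pyRange_one]
  by_cases hk : k < 1
  · rw [if_pos hk]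
    have : (k - 0).toNat = 0 := by omega
    rw [this]
    simp
  · rw [if_neg hk]
    have h0 : (["0"] : List String) = (List.range 1).map bin := by decide
    have h1 : (["1"] : List String) = (List.range' 1 1).map bin := by decide
    rw [h0, h1, loop_inv (k.toNat - 1) k 1 (le_refl 1) rfl]
    have hmax : max 1 k.toNat = (k - 0).toNat := by omega
    rw [hmax]
    simp [bin]
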